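-- pv_equiv track=rewrite | github.com/kgs/aoc2022 | day18/solve.py | flow_and_count
-- ===== SOURCE A (Python) =====
-- from typing import Iterable
--
-- Point = tuple[int, int, int]
--
-- def neighbours(p: Point) -> Iterable[Point]:
--     diffs = [-1, 1]
--     x, y, z = p
--     for d in diffs:
--         yield Point((x + d, y, z))
--         yield Point((x, y + d, z))
--         yield Point((x, y, z + d))
--
-- def flow_and_count(g: set[Point], visited: set[Point], p: Point, min_p: Point, max_p: Point) -> int:
--     assert p not in g
--     if not all(a <= b <= c for a, b, c in zip(min_p, p, max_p)):
--         # we are out of bounds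
--         return 0
--     if p in visited:
--         return 0
--     visited.add(p)
--     res = 0
--     for n in neighbours(p):
--         if n in g:
--             res += 1
--         else:
--             res += flow_and_count(g, visited, n, min_p, max_p)
--     return res
-- ===== SOURCE B (Python) =====
-- from typing import Iterable
--
-- Point = tuple[int, int, int]
--
-- OFFSETS = [(-1, 0, 0), (0, -1, 0), (0, 0, -1), (1, 0, 0), (0, 1, 0), (0, 0, 1)]
--
-- def nbrs(q: Point) -> list:
--     x, y, z = q
--     return [(x + dx, y + dy, z + dz) for dx, dy, dz in OFFSETS]
--
-- def in_bounds(lo: Point, q: Point, hi: Point) -> bool: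
--     return (lo[0] <= q[0] <= hi[0] and lo[1] <= q[1] <= hi[1]
--             and lo[2] <= q[2] <= hi[2])
--
-- def face_count(g: set, q: Point) -> int:
--     return sum(1 for n in nbrs(q) if n in g)
--
-- def flow_and_count(g: set, visited: set, p: Point, min_p: Point, max_p: Point) -> int:
--     assert p not in g
--     # phase 1: flood-fill with an explicit stack, only collecting the cells
--     # newly marked visited (in visit order); no counting here
--     new = []
--     stack = [p]
--     while stack:
--         q = stack.pop()
--         if not in_bounds(min_p, q, max_p):
--             continue
--         if q in visited:
--             continue
--         visited.add(q)
--         new.append(q)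
--         air = [n for n in nbrs(q) if n not in g]
--         stack.extend(reversed(air))
--     # phase 2: every newly flooded cell contributes one face per lava neighbour
--     return sum(face_count(g, q) for q in new)
-- ===== Notes on version B (the rewrite author's own statement) =====
-- stated objective: alternative
-- what changed: Replaces A's recursive flood-fill (counting faces inside the recursion, one recursive call per air neighbour) by a two-phase computation: an iterative explicit-stack loop that only collects the newly flooded cells, followed by a separate pass summing each collected cell's lava-neighbour faces.
import Mathlib
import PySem

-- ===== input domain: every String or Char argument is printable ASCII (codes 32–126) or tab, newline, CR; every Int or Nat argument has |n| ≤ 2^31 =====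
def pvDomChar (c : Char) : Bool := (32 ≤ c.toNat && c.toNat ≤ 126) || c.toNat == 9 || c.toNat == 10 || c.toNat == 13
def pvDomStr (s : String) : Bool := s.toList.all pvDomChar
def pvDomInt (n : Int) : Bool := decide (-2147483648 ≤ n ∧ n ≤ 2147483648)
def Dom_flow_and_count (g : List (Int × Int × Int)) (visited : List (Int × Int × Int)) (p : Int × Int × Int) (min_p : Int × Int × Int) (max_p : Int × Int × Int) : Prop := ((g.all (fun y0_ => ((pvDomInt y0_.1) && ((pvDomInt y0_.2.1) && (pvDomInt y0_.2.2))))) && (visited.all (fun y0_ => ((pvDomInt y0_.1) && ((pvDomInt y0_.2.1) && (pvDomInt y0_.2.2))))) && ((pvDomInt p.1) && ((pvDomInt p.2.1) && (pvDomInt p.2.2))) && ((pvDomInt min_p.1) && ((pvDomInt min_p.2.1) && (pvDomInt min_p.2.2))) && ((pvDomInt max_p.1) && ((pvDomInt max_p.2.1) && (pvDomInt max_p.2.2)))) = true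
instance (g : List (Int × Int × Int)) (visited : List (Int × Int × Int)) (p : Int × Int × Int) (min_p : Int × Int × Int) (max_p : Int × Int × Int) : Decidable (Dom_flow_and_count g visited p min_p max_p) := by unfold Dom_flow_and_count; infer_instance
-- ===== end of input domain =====

-- B replaces A's recursive flood-fill by a two-phase computation: an explicit-stack loop that
-- only COLLECTS the newly flooded cells, then a separate summation pass counting lava faces
-- (objective: alternative).  Both Pythons mutate `visited` in place (ending with the same set);
-- the equivalence proved here is about the RETURN value, with `visited` threaded through the ports.

-- ===== PORT A =====
-- Python's neighbours(p) generator, in yield order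
def pvNbrs (p : Int × Int × Int) : List (Int × Int × Int) :=
  [(p.1 - 1, p.2.1, p.2.2), (p.1, p.2.1 - 1, p.2.2), (p.1, p.2.1, p.2.2 - 1),
   (p.1 + 1, p.2.1, p.2.2), (p.1, p.2.1 + 1, p.2.2), (p.1, p.2.1, p.2.2 + 1)]

-- all(a <= b <= c for a, b, c in zip(min_p, p, max_p))
def pvInB (min_p p max_p : Int × Int × Int) : Bool :=
  decide (min_p.1 ≤ p.1 ∧ p.1 ≤ max_p.1 ∧ min_p.2.1 ≤ p.2.1 ∧ p.2.1 ≤ max_p.2.1 ∧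
          min_p.2.2 ≤ p.2.2 ∧ p.2.2 ≤ max_p.2.2)

-- termination measure (used only in decreasing_by): the cells of the bounding box, as a list
def pvRegion (min_p max_p : Int × Int × Int) : List (Int × Int × Int) :=
  (List.range ((max_p.1 - min_p.1).toNat + 1)).flatMap (fun (i : Nat) =>
    (List.range ((max_p.2.1 - min_p.2.1).toNat + 1)).flatMap (fun (j : Nat) =>
      (List.range ((max_p.2.2 - min_p.2.2).toNat + 1)).map (fun (k : Nat) =>
        (min_p.1 + (i : Int), min_p.2.1 + (j : Int), min_p.2.2 + (k : Int)))))

-- termination measure: number of in-bounds cells not yet visited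
def pvMu (min_p max_p : Int × Int × Int) (v : List (Int × Int × Int)) : Nat :=
  ((pvRegion min_p max_p).filter (fun x => decide (x ∉ v))).length

-- an in-bounds point lies in the bounding-box list (used by pvMu_lt)
theorem pvRegion_mem (min_p max_p p : Int × Int × Int)
    (h : pvInB min_p p max_p = true) : p ∈ pvRegion min_p max_p := by
  simp only [pvInB, decide_eq_true_eq] at h
  obtain ⟨h1, h2, h3, h4, h5, h6⟩ := h
  apply List.mem_flatMap.mpr
  refine ⟨(p.1 - min_p.1).toNat,
    List.mem_range.mpr (Nat.lt_succ_of_le (Int.toNat_le_toNat (Int.sub_le_sub_right h2 _))), ?_⟩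
  apply List.mem_flatMap.mpr
  refine ⟨(p.2.1 - min_p.2.1).toNat,
    List.mem_range.mpr (Nat.lt_succ_of_le (Int.toNat_le_toNat (Int.sub_le_sub_right h4 _))), ?_⟩
  apply List.mem_map.mpr
  refine ⟨(p.2.2 - min_p.2.2).toNat,
    List.mem_range.mpr (Nat.lt_succ_of_le (Int.toNat_le_toNat (Int.sub_le_sub_right h6 _))), ?_⟩
  obtain ⟨a, b, c⟩ := p
  simp only [Prod.mk.injEq]
  refine ⟨?_, ?_, ?_⟩
  · rw [Int.toNat_of_nonneg (sub_nonneg.mpr h1)]; exact add_sub_cancel _ _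
  · rw [Int.toNat_of_nonneg (sub_nonneg.mpr h3)]; exact add_sub_cancel _ _
  · rw [Int.toNat_of_nonneg (sub_nonneg.mpr h5)]; exact add_sub_cancel _ _

-- cited by the ports' decreasing_by: the measure is antitone in the visited set
theorem pvMu_le (min_p max_p : Int × Int × Int) (v v' : List (Int × Int × Int))
    (h : ∀ x ∈ v, x ∈ v') : pvMu min_p max_p v' ≤ pvMu min_p max_p v := by
  apply List.Sublist.length_le
  apply List.monotone_filter_right
  intro a ha
  simp only [decide_eq_true_eq] at ha ⊢
  exact fun hav => ha (h a hav)

-- cited by the ports' decreasing_by: marking an in-bounds unvisited cell shrinks the measure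
theorem pvMu_lt (min_p max_p : Int × Int × Int) (v : List (Int × Int × Int)) (p : Int × Int × Int)
    (h1 : pvInB min_p p max_p = true) (h2 : p ∉ v) :
    pvMu min_p max_p (PySem.Set.add v p) < pvMu min_p max_p v := by
  have hsub : List.Sublist ((pvRegion min_p max_p).filter (fun x => decide (x ∉ PySem.Set.add v p)))
      ((pvRegion min_p max_p).filter (fun x => decide (x ∉ v))) := by
    apply List.monotone_filter_right
    intro a ha
    simp only [decide_eq_true_eq] at ha ⊢
    exact fun hav => ha ((PySem.Set.mem_add v p a).mpr (Or.inl hav))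
  have hle := hsub.length_le
  rcases Nat.lt_or_ge (pvMu min_p max_p (PySem.Set.add v p)) (pvMu min_p max_p v) with h | h
  · exact h
  · exfalso
    have heq : ((pvRegion min_p max_p).filter (fun x => decide (x ∉ PySem.Set.add v p))).length =
        ((pvRegion min_p max_p).filter (fun x => decide (x ∉ v))).length := by
      exact Nat.le_antisymm hle h
    have hlists := hsub.eq_of_length heq
    have hpmem : p ∈ (pvRegion min_p max_p).filter (fun x => decide (x ∉ v)) := by
      simp only [List.mem_filter, decide_eq_true_eq]
      exact ⟨pvRegion_mem min_p max_p p h1, h2⟩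
    rw [← hlists] at hpmem
    simp only [List.mem_filter, decide_eq_true_eq] at hpmem
    exact hpmem.2 ((PySem.Set.mem_add v p p).mpr (Or.inr rfl))

-- cited by decreasing_by: the arithmetic of the termination measure, packaged so the
-- compiled recursion carries only tiny proof terms
theorem pvSeven (a b : Nat) (h : b < a) : 7 * b + 7 ≤ 7 * a :=
  Nat.le_trans (Nat.le_of_eq (Nat.mul_succ 7 b).symm) (Nat.mul_le_mul_left 7 (Nat.succ_le_of_lt h))

theorem pvDecStep (p : Int × Int × Int) (a b : Nat) (h : b < a) :
    7 * b + (pvNbrs p).length + 1 < 7 * a + 1 := by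
  have h6 : (pvNbrs p).length = 6 := rfl
  rw [h6]
  exact Nat.succ_lt_succ (Nat.lt_of_lt_of_le (Nat.lt_succ_self (7 * b + 6)) (pvSeven a b h))

theorem pvDecTail (m : Nat) (n : Int × Int × Int) (rest : List (Int × Int × Int)) :
    7 * m + rest.length + 1 < 7 * m + (n :: rest).length + 1 := by
  rw [List.length_cons]
  exact Nat.succ_lt_succ (Nat.lt_succ_self _)

theorem pvDecCall (m : Nat) (n : Int × Int × Int) (rest : List (Int × Int × Int)) :
    7 * m + 1 < 7 * m + (n :: rest).length + 1 := by
  rw [List.length_cons]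
  exact Nat.succ_lt_succ (Nat.lt_succ_of_le (Nat.le_add_right _ _))

theorem pvDecNest (m' m : Nat) (h : m' ≤ m) (n : Int × Int × Int) (rest : List (Int × Int × Int)) :
    7 * m' + rest.length + 1 < 7 * m + (n :: rest).length + 1 := by
  rw [List.length_cons]
  exact Nat.succ_lt_succ (Nat.lt_succ_of_le (Nat.add_le_add_right (Nat.mul_le_mul_left 7 h) _))

-- cited by the ports: visited only grows (as a prefix), termination bookkeeping
theorem pvAddPrefix (v : List (Int × Int × Int)) (p : Int × Int × Int) :
    v <+: PySem.Set.add v p := by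
  by_cases h : p ∈ v
  · simp [PySem.Set.add, PySem.Set.contains, h]
  · simp [PySem.Set.add, PySem.Set.contains, h]

-- A's recursion, with the mutated `visited` set threaded through; the subtype carries the
-- invariant "visited grows as a prefix", needed only for termination
mutual
def pvFlowA (g : List (Int × Int × Int)) (min_p max_p : Int × Int × Int)
    (visited : List (Int × Int × Int)) (p : Int × Int × Int) :
    {r : Int × List (Int × Int × Int) // visited <+: r.2} :=
  if h1 : ¬ (pvInB min_p p max_p = true) then ⟨(0, visited), List.prefix_refl _⟩   -- out of bounds
  else if h2 : p ∈ visited then ⟨(0, visited), List.prefix_refl _⟩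
  else
    match pvFlowSeq g min_p max_p (PySem.Set.add visited p) (pvNbrs p) with   -- visited.add(p); loop
    | ⟨(r1, v1), hv⟩ => ⟨(r1, v1), (pvAddPrefix visited p).trans hv⟩
termination_by 7 * pvMu min_p max_p visited + 1
decreasing_by
  exact pvDecStep p _ _ (pvMu_lt min_p max_p visited p (of_not_not h1) h2)

-- A's `for n in neighbours(p)` loop: res += 1 if n in g else res += flow_and_count(…)
def pvFlowSeq (g : List (Int × Int × Int)) (min_p max_p : Int × Int × Int)
    (visited : List (Int × Int × Int)) (ns : List (Int × Int × Int)) :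
    {r : Int × List (Int × Int × Int) // visited <+: r.2} :=
  match ns with
  | [] => ⟨(0, visited), List.prefix_refl _⟩
  | n :: rest =>
    if n ∈ g then
      match pvFlowSeq g min_p max_p visited rest with
      | ⟨(r2, v2), hv⟩ => ⟨(1 + r2, v2), hv⟩
    else
      match pvFlowA g min_p max_p visited n with
      | ⟨(r1, v1), hv1⟩ =>
        match pvFlowSeq g min_p max_p v1 rest with
        | ⟨(r2, v2), hv2⟩ => ⟨(r1 + r2, v2), hv1.trans hv2⟩
termination_by 7 * pvMu min_p max_p visited + ns.length + 1
decreasing_by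
  · exact pvDecTail _ n rest
  · exact pvDecCall _ n rest
  · exact pvDecNest _ _ (pvMu_le min_p max_p visited v1 (fun x hx => hv1.subset hx)) n rest
end

def flow_and_count (g : List (Int × Int × Int)) (visited : List (Int × Int × Int)) (p : Int × Int × Int) (min_p : Int × Int × Int) (max_p : Int × Int × Int) : Int :=
  (pvFlowA g min_p max_p visited p).val.1

-- ===== PORT B =====
-- OFFSETS and nbrs(q) of Source B
def altOffs : List (Int × Int × Int) :=
  [(-1, 0, 0), (0, -1, 0), (0, 0, -1), (1, 0, 0), (0, 1, 0), (0, 0, 1)]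

def altNbrs (q : Int × Int × Int) : List (Int × Int × Int) :=
  altOffs.map (fun d => (q.1 + d.1, q.2.1 + d.2.1, q.2.2 + d.2.2))

-- in_bounds(lo, q, hi) of Source B
def altOk (lo q hi : Int × Int × Int) : Bool :=
  decide (lo.1 ≤ q.1) && decide (q.1 ≤ hi.1) && decide (lo.2.1 ≤ q.2.1) &&
  decide (q.2.1 ≤ hi.2.1) && decide (lo.2.2 ≤ q.2.2) && decide (q.2.2 ≤ hi.2.2)

-- face_count(g, q) of Source B
def altFaces (g : List (Int × Int × Int)) (q : Int × Int × Int) : Int :=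
  ((altNbrs q).countP (fun n => decide (n ∈ g)) : Int)

-- phase 1 of Source B: the while loop over the explicit stack (head of the Lean list = top/end of
-- Python's list; stack.extend(reversed(air)) = air prepended in natural order), collecting the
-- newly marked cells in `new`; the fuel argument only makes the same loop structurally total
def altFill (g : List (Int × Int × Int)) (lo hi : Int × Int × Int) :
    Nat → List (Int × Int × Int) → List (Int × Int × Int) → List (Int × Int × Int) →
    List (Int × Int × Int) × List (Int × Int × Int)
  | _, visited, new, [] => (visited, new)
  | 0, visited, new, _ => (visited, new)       -- fuel exhausted (never reached with altFuel)
  | fuel + 1, visited, new, q :: rest =>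
    if altOk lo q hi = false then altFill g lo hi fuel visited new rest          -- continue
    else if q ∈ visited then altFill g lo hi fuel visited new rest               -- continue
    else altFill g lo hi fuel (PySem.Set.add visited q) (new ++ [q])
      ((altNbrs q).filter (fun n => !decide (n ∈ g)) ++ rest)

-- fuel that can never run out: 7 cells of budget per bounding-box cell, plus slack
def altFuel (lo hi : Int × Int × Int) : Nat :=
  7 * (((hi.1 - lo.1).toNat + 1) * ((hi.2.1 - lo.2.1).toNat + 1) * ((hi.2.2 - lo.2.2).toNat + 1)) + 2

-- phase 2 of Source B: sum(face_count(g, q) for q in new)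
def flow_and_count_alt (g : List (Int × Int × Int)) (visited : List (Int × Int × Int)) (p : Int × Int × Int) (min_p : Int × Int × Int) (max_p : Int × Int × Int) : Int :=
  ((altFill g min_p max_p (altFuel min_p max_p) visited [] [p]).2).foldl
    (fun s q => s + altFaces g q) 0

-- ===== PRECONDITION & SPEC =====
-- Pre_ excludes exactly the inputs where `assert p not in g` raises AssertionError (in A and in B alike).
def Pre_flow_and_count (g : List (Int × Int × Int)) (visited : List (Int × Int × Int)) (p : Int × Int × Int) (min_p : Int × Int × Int) (max_p : Int × Int × Int) : Prop := p ∉ g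
instance (g : List (Int × Int × Int)) (visited : List (Int × Int × Int)) (p : Int × Int × Int) (min_p : Int × Int × Int) (max_p : Int × Int × Int) : Decidable (Pre_flow_and_count g visited p min_p max_p) := by unfold Pre_flow_and_count; infer_instance

def pvWitness_flow_and_count : (List (Int × Int × Int)) × (List (Int × Int × Int)) × (Int × Int × Int) × (Int × Int × Int) × (Int × Int × Int) :=
  ([(1, 0, 0)], [], (0, 0, 0), (0, 0, 0), (1, 1, 1))

def Spec_flow_and_count (g : List (Int × Int × Int)) (visited : List (Int × Int × Int)) (p : Int × Int × Int) (min_p : Int × Int × Int) (max_p : Int × Int × Int) (out : Int) : Prop := out = flow_and_count_alt g visited p min_p max_p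
instance (g : List (Int × Int × Int)) (visited : List (Int × Int × Int)) (p : Int × Int × Int) (min_p : Int × Int × Int) (max_p : Int × Int × Int) (out : Int) : Decidable (Spec_flow_and_count g visited p min_p max_p out) := by unfold Spec_flow_and_count; infer_instance

-- ===== CLAIM (what is proved, stated in full; the proofs are below) =====
def Claim_equal_flow_and_count : Prop := ∀ (g : List (Int × Int × Int)) (visited : List (Int × Int × Int)) (p : Int × Int × Int) (min_p : Int × Int × Int) (max_p : Int × Int × Int), Dom_flow_and_count g visited p min_p max_p → Pre_flow_and_count g visited p min_p max_p → Spec_flow_and_count g visited p min_p max_p (flow_and_count g visited p min_p max_p)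

-- ===== LEMMAS AND PROOFS =====

theorem pvWitness_ok : Dom_flow_and_count pvWitness_flow_and_count.1 pvWitness_flow_and_count.2.1
    pvWitness_flow_and_count.2.2.1 pvWitness_flow_and_count.2.2.2.1 pvWitness_flow_and_count.2.2.2.2
    ∧ Pre_flow_and_count pvWitness_flow_and_count.1 pvWitness_flow_and_count.2.1
    pvWitness_flow_and_count.2.2.1 pvWitness_flow_and_count.2.2.2.1 pvWitness_flow_and_count.2.2.2.2 := by
  constructor <;> decide

-- bridges between B's helpers and A's
theorem altNbrs_eq (q : Int × Int × Int) : altNbrs q = pvNbrs q := by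
  simp [altNbrs, altOffs, pvNbrs]
  norm_num [sub_eq_add_neg]

theorem altOk_eq (lo q hi : Int × Int × Int) : altOk lo q hi = pvInB lo q hi := by
  simp only [altOk, pvInB]
  by_cases h1 : lo.1 ≤ q.1 <;> by_cases h2 : q.1 ≤ hi.1 <;>
    by_cases h3 : lo.2.1 ≤ q.2.1 <;> by_cases h4 : q.2.1 ≤ hi.2.1 <;>
    by_cases h5 : lo.2.2 ≤ q.2.2 <;> by_cases h6 : q.2.2 ≤ hi.2.2 <;>
    simp [h1, h2, h3, h4, h5, h6]

theorem altAir_eq (g : List (Int × Int × Int)) (q : Int × Int × Int) :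
    (altNbrs q).filter (fun n => !decide (n ∈ g)) = (pvNbrs q).filter (fun n => decide (n ∉ g)) := by
  rw [altNbrs_eq]
  apply List.filter_congr
  intro n _
  simp

-- Set.add on a fresh element is an append
theorem pvSetAdd (v : List (Int × Int × Int)) (q : Int × Int × Int) (h : q ∉ v) :
    PySem.Set.add v q = v ++ [q] := by
  simp [PySem.Set.add, PySem.Set.contains, h]

-- unfolding lemmas for A's port
theorem pvSeq_nil (g : List (Int × Int × Int)) (min_p max_p : Int × Int × Int)
    (v : List (Int × Int × Int)) : (pvFlowSeq g min_p max_p v []).val = (0, v) := by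
  rw [pvFlowSeq]

theorem pvSeq_cons_in (g : List (Int × Int × Int)) (min_p max_p : Int × Int × Int)
    (v : List (Int × Int × Int)) (n : Int × Int × Int) (rest : List (Int × Int × Int))
    (hn : n ∈ g) :
    (pvFlowSeq g min_p max_p v (n :: rest)).val =
      (1 + (pvFlowSeq g min_p max_p v rest).val.1, (pvFlowSeq g min_p max_p v rest).val.2) := by
  rw [pvFlowSeq]
  simp only [if_pos hn]

theorem pvSeq_cons_out (g : List (Int × Int × Int)) (min_p max_p : Int × Int × Int)
    (v : List (Int × Int × Int)) (n : Int × Int × Int) (rest : List (Int × Int × Int))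
    (hn : n ∉ g) :
    (pvFlowSeq g min_p max_p v (n :: rest)).val =
      ((pvFlowA g min_p max_p v n).val.1 +
        (pvFlowSeq g min_p max_p (pvFlowA g min_p max_p v n).val.2 rest).val.1,
       (pvFlowSeq g min_p max_p (pvFlowA g min_p max_p v n).val.2 rest).val.2) := by
  rw [pvFlowSeq]
  simp only [if_neg hn]

theorem pvA_skip (g : List (Int × Int × Int)) (min_p max_p : Int × Int × Int)
    (v : List (Int × Int × Int)) (p : Int × Int × Int)
    (h : ¬ (pvInB min_p p max_p = true) ∨ p ∈ v) :
    (pvFlowA g min_p max_p v p).val = (0, v) := by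
  rw [pvFlowA]
  rcases h with h | h
  · simp [h]
  · by_cases hb : pvInB min_p p max_p = true <;> simp [hb, h]

theorem pvA_step (g : List (Int × Int × Int)) (min_p max_p : Int × Int × Int)
    (v : List (Int × Int × Int)) (p : Int × Int × Int)
    (h1 : pvInB min_p p max_p = true) (h2 : p ∉ v) :
    (pvFlowA g min_p max_p v p).val =
      (pvFlowSeq g min_p max_p (PySem.Set.add v p) (pvNbrs p)).val := by
  rw [pvFlowA]
  simp only [h1, not_true_eq_false, dite_false, h2]

-- A's loop over a neighbour list splits into the in-g count plus the recursions on the rest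
theorem pvSeq_filter (g : List (Int × Int × Int)) (min_p max_p : Int × Int × Int) :
    ∀ (ns : List (Int × Int × Int)) (v : List (Int × Int × Int)),
    (pvFlowSeq g min_p max_p v ns).val =
      ((ns.countP (fun n => decide (n ∈ g)) : Int) +
        (pvFlowSeq g min_p max_p v (ns.filter (fun n => decide (n ∉ g)))).val.1,
       (pvFlowSeq g min_p max_p v (ns.filter (fun n => decide (n ∉ g)))).val.2) := by
  intro ns
  induction ns with
  | nil => intro v; simp [pvSeq_nil]
  | cons n rest ih =>
    intro v
    by_cases hn : n ∈ g
    · rw [pvSeq_cons_in g min_p max_p v n rest hn]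
      simp only [List.countP_cons, List.filter_cons, hn, decide_true, not_true_eq_false,
        decide_false, Bool.false_eq_true, if_false, if_true]
      rw [ih v]
      simp [Prod.ext_iff]
      ring
    · rw [pvSeq_cons_out g min_p max_p v n rest hn]
      simp only [List.countP_cons, List.filter_cons, hn, decide_false, not_false_eq_true,
        decide_true, Bool.false_eq_true, if_false, if_true]
      rw [pvSeq_cons_out g min_p max_p v n (rest.filter (fun n => decide (n ∉ g))) hn]
      rw [ih ((pvFlowA g min_p max_p v n).val.2)]
      simp [Prod.ext_iff]
      ring

-- A's loop is compositional in the neighbour list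
theorem pvSeq_append (g : List (Int × Int × Int)) (min_p max_p : Int × Int × Int) :
    ∀ (xs : List (Int × Int × Int)) (v ys : List (Int × Int × Int)),
    (pvFlowSeq g min_p max_p v (xs ++ ys)).val =
      ((pvFlowSeq g min_p max_p v xs).val.1 +
        (pvFlowSeq g min_p max_p (pvFlowSeq g min_p max_p v xs).val.2 ys).val.1,
       (pvFlowSeq g min_p max_p (pvFlowSeq g min_p max_p v xs).val.2 ys).val.2) := by
  intro xs
  induction xs with
  | nil =>
    intro v ys
    rw [List.nil_append, pvSeq_nil g min_p max_p v]
    simp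
  | cons n rest ih =>
    intro v ys
    by_cases hn : n ∈ g
    · rw [List.cons_append, pvSeq_cons_in g min_p max_p v n (rest ++ ys) hn,
        pvSeq_cons_in g min_p max_p v n rest hn]
      rw [ih v]
      simp [Prod.ext_iff]
      ring
    · rw [List.cons_append, pvSeq_cons_out g min_p max_p v n (rest ++ ys) hn,
        pvSeq_cons_out g min_p max_p v n rest hn]
      rw [ih ((pvFlowA g min_p max_p v n).val.2)]
      simp [Prod.ext_iff]
      ring

-- face totals (B's phase 2), written exactly as the port's fold
def pvFaceSum (g : List (Int × Int × Int)) (l : List (Int × Int × Int)) : Int :=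
  l.foldl (fun s q => s + altFaces g q) 0

theorem pvFaceSum_cons (g : List (Int × Int × Int)) (n : Int × Int × Int)
    (l : List (Int × Int × Int)) : pvFaceSum g (n :: l) = altFaces g n + pvFaceSum g l := by
  have h : ∀ (l : List (Int × Int × Int)) (a : Int),
      l.foldl (fun s q => s + altFaces g q) a = a + l.foldl (fun s q => s + altFaces g q) 0 := by
    intro l
    induction l with
    | nil => intro a; simp
    | cons x xs ih =>
      intro a
      simp only [List.foldl_cons]
      rw [ih (a + altFaces g x), ih (0 + altFaces g x)]
      ring
  simp only [pvFaceSum, List.foldl_cons]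
  rw [h _ (0 + altFaces g n)]
  ring

-- the wf-recursive reference form of B's phase-1 loop (proof-side only; altFill with
-- sufficient fuel equals it)
theorem pvRefDecSkip (m : Nat) (q : Int × Int × Int) (rest : List (Int × Int × Int)) :
    7 * m + rest.length < 7 * m + (q :: rest).length := by
  rw [List.length_cons]
  exact Nat.lt_succ_self _

theorem pvAirLen (g : List (Int × Int × Int)) (q : Int × Int × Int) :
    ((altNbrs q).filter (fun n => !decide (n ∈ g))).length ≤ 6 := by
  have h := List.length_filter_le (fun n => !decide (n ∈ g)) (altNbrs q)
  have h6 : (altNbrs q).length = 6 := rfl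
  omega

theorem pvRefDecStep (g : List (Int × Int × Int)) (lo hi q : Int × Int × Int)
    (v rest : List (Int × Int × Int))
    (h1 : pvInB lo q hi = true) (h2 : q ∉ v) :
    7 * pvMu lo hi (PySem.Set.add v q) + ((altNbrs q).filter (fun n => !decide (n ∈ g)) ++ rest).length
    < 7 * pvMu lo hi v + (q :: rest).length := by
  have hlt := pvSeven _ _ (pvMu_lt lo hi v q h1 h2)
  have hlen := pvAirLen g q
  rw [List.length_append, List.length_cons]
  omega

def pvRef (g : List (Int × Int × Int)) (lo hi : Int × Int × Int)
    (visited new stack : List (Int × Int × Int)) :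
    List (Int × Int × Int) × List (Int × Int × Int) :=
  match stack with
  | [] => (visited, new)
  | q :: rest =>
    if h1 : altOk lo q hi = false then pvRef g lo hi visited new rest
    else if h2 : q ∈ visited then pvRef g lo hi visited new rest
    else pvRef g lo hi (PySem.Set.add visited q) (new ++ [q])
      ((altNbrs q).filter (fun n => !decide (n ∈ g)) ++ rest)
termination_by 7 * pvMu lo hi visited + stack.length
decreasing_by
  · exact pvRefDecSkip _ q rest
  · exact pvRefDecSkip _ q rest
  · exact pvRefDecStep g lo hi q visited rest (by rw [← altOk_eq]; simpa using h1) h2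

theorem pvRef_nil (g : List (Int × Int × Int)) (lo hi : Int × Int × Int)
    (v new : List (Int × Int × Int)) : pvRef g lo hi v new [] = (v, new) := by
  rw [pvRef]

theorem pvRef_skip (g : List (Int × Int × Int)) (lo hi : Int × Int × Int)
    (v new : List (Int × Int × Int)) (q : Int × Int × Int) (rest : List (Int × Int × Int))
    (h : ¬ (pvInB lo q hi = true) ∨ q ∈ v) :
    pvRef g lo hi v new (q :: rest) = pvRef g lo hi v new rest := by
  rw [pvRef]
  rcases h with h | h
  · have hok : altOk lo q hi = false := by
      rw [altOk_eq]
      exact Bool.eq_false_iff.mpr h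
    simp [hok]
  · by_cases hb : altOk lo q hi = false <;> simp [hb, h]

theorem pvRef_step (g : List (Int × Int × Int)) (lo hi : Int × Int × Int)
    (v new : List (Int × Int × Int)) (q : Int × Int × Int) (rest : List (Int × Int × Int))
    (h1 : pvInB lo q hi = true) (h2 : q ∉ v) :
    pvRef g lo hi v new (q :: rest) =
      pvRef g lo hi (PySem.Set.add v q) (new ++ [q])
        ((altNbrs q).filter (fun n => !decide (n ∈ g)) ++ rest) := by
  rw [pvRef]
  rw [← altOk_eq] at h1
  simp [h1, h2]

-- altFill with enough fuel computes pvRef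
theorem pvFill_eq_ref (g : List (Int × Int × Int)) (lo hi : Int × Int × Int) :
    ∀ (F : Nat) (v new st : List (Int × Int × Int)),
    7 * pvMu lo hi v + st.length ≤ F →
    altFill g lo hi F v new st = pvRef g lo hi v new st := by
  intro F
  induction F with
  | zero =>
    intro v new st hF
    match st with
    | [] => rw [pvRef_nil]; rfl
    | q :: rest => simp [List.length_cons] at hF
  | succ F ih =>
    intro v new st hF
    match st with
    | [] => rw [pvRef_nil]; rfl
    | q :: rest =>
      by_cases hb : pvInB lo q hi = true
      · by_cases hv : q ∈ v
        · rw [pvRef_skip g lo hi v new q rest (Or.inr hv)]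
          show altFill g lo hi (F + 1) v new (q :: rest) = _
          rw [altFill]
          by_cases hok : altOk lo q hi = false
          · rw [if_pos hok]
            apply ih
            simp [List.length_cons] at hF
            omega
          · rw [if_neg hok, if_pos hv]
            apply ih
            simp [List.length_cons] at hF
            omega
        · rw [pvRef_step g lo hi v new q rest hb hv]
          show altFill g lo hi (F + 1) v new (q :: rest) = _
          rw [altFill]
          have hok : ¬ (altOk lo q hi = false) := by
            rw [altOk_eq]; simp [hb]
          rw [if_neg hok, if_neg hv]
          apply ih
          have := pvRefDecStep g lo hi q v rest hb hv
          simp [List.length_cons] at hF this ⊢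
          omega
      · rw [pvRef_skip g lo hi v new q rest (Or.inl hb)]
        show altFill g lo hi (F + 1) v new (q :: rest) = _
        rw [altFill]
        have hok : altOk lo q hi = false := by
          rw [altOk_eq]; simp [hb]
        rw [if_pos hok]
        apply ih
        simp [List.length_cons] at hF
        omega

-- initial fuel is always enough: the measure is at most 7·(box volume) + 1
theorem pvRegionLen (lo hi : Int × Int × Int) :
    (pvRegion lo hi).length =
      ((hi.1 - lo.1).toNat + 1) * ((hi.2.1 - lo.2.1).toNat + 1) * ((hi.2.2 - lo.2.2).toNat + 1) := by
  simp [pvRegion, List.length_flatMap]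
  ring

theorem pvFuel_enough (lo hi : Int × Int × Int) (v : List (Int × Int × Int)) :
    7 * pvMu lo hi v + 1 ≤ altFuel lo hi := by
  have h1 : pvMu lo hi v ≤ (pvRegion lo hi).length := List.length_filter_le _ _
  rw [pvRegionLen] at h1
  simp only [altFuel]
  omega

-- the bridge for countP in pvSeq_filter
theorem pvCount_eq (g : List (Int × Int × Int)) (q : Int × Int × Int) :
    ((pvNbrs q).countP (fun n => decide (n ∈ g)) : Int) = altFaces g q := by
  rw [altFaces, altNbrs_eq]

-- MAIN SIMULATION: for a worklist ns of air cells, A's sequential recursion on ns yields some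
-- fresh suffix Δ of visited cells whose face total is A's count, and B's phase-1 loop on
-- ns ++ s marks exactly Δ (in the same order) and continues with s
theorem pvMain (g : List (Int × Int × Int)) (lo hi : Int × Int × Int) :
    ∀ (k : Nat) (v ns : List (Int × Int × Int)),
    pvMu lo hi v ≤ k → (∀ n ∈ ns, n ∉ g) →
    ∃ Δ : List (Int × Int × Int),
      (pvFlowSeq g lo hi v ns).val = (pvFaceSum g Δ, v ++ Δ) ∧
      ∀ (new s : List (Int × Int × Int)),
        pvRef g lo hi v new (ns ++ s) = pvRef g lo hi (v ++ Δ) (new ++ Δ) s := by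
  intro k
  induction k with
  | zero =>
    intro v ns hk hns
    induction ns with
    | nil =>
      refine ⟨[], ?_, ?_⟩
      · rw [pvSeq_nil]; simp [pvFaceSum]
      · intro new s; simp
    | cons n rest ih =>
      have hn : n ∉ g := hns n (List.mem_cons_self ..)
      have hrest : ∀ m ∈ rest, m ∉ g := fun m hm => hns m (List.mem_cons_of_mem _ hm)
      obtain ⟨Δ, hseq, href⟩ := ih hrest
      by_cases hb : pvInB lo n hi = true
      · by_cases hv : n ∈ v
        · refine ⟨Δ, ?_, ?_⟩
          · rw [pvSeq_cons_out g lo hi v n rest hn, pvA_skip g lo hi v n (Or.inr hv), hseq]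
            simp
          · intro new s
            rw [List.cons_append, pvRef_skip g lo hi v new n (rest ++ s) (Or.inr hv)]
            exact href new s
        · exact absurd (Nat.lt_of_lt_of_le (pvMu_lt lo hi v n hb hv) hk) (Nat.not_lt_zero _)
      · refine ⟨Δ, ?_, ?_⟩
        · rw [pvSeq_cons_out g lo hi v n rest hn, pvA_skip g lo hi v n (Or.inl hb), hseq]
          simp
        · intro new s
          rw [List.cons_append, pvRef_skip g lo hi v new n (rest ++ s) (Or.inl hb)]
          exact href new s
  | succ k ihk =>
    intro v ns hk hns
    induction ns with
    | nil =>
      refine ⟨[], ?_, ?_⟩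
      · rw [pvSeq_nil]; simp [pvFaceSum]
      · intro new s; simp
    | cons n rest ih =>
      have hn : n ∉ g := hns n (List.mem_cons_self ..)
      have hrest : ∀ m ∈ rest, m ∉ g := fun m hm => hns m (List.mem_cons_of_mem _ hm)
      by_cases hb : pvInB lo n hi = true
      · by_cases hv : n ∈ v
        · obtain ⟨Δ, hseq, href⟩ := ih hrest
          refine ⟨Δ, ?_, ?_⟩
          · rw [pvSeq_cons_out g lo hi v n rest hn, pvA_skip g lo hi v n (Or.inr hv), hseq]
            simp
          · intro new s
            rw [List.cons_append, pvRef_skip g lo hi v new n (rest ++ s) (Or.inr hv)]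
            exact href new s
        · -- the real step: mark n, recurse on its air neighbours then the rest
          have hadd : PySem.Set.add v n = v ++ [n] := pvSetAdd v n hv
          have hmu : pvMu lo hi (v ++ [n]) ≤ k := by
            have := pvMu_lt lo hi v n hb hv
            rw [hadd] at this
            omega
          have hair : ∀ m ∈ (pvNbrs n).filter (fun m => decide (m ∉ g)) ++ rest, m ∉ g := by
            intro m hm
            rcases List.mem_append.mp hm with hm | hm
            · simpa using (List.of_mem_filter hm)
            · exact hrest m hm
          obtain ⟨Δ', hseq', href'⟩ :=
            ihk (v ++ [n]) ((pvNbrs n).filter (fun m => decide (m ∉ g)) ++ rest) hmu hair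
          refine ⟨n :: Δ', ?_, ?_⟩
          · -- A's value: countP(nbrs n ∈ g) + (recursions) = faces n + faceSum Δ'
            rw [pvSeq_cons_out g lo hi v n rest hn, pvA_step g lo hi v n hb hv, hadd]
            rw [pvSeq_filter g lo hi (pvNbrs n) (v ++ [n])]
            have happ := pvSeq_append g lo hi ((pvNbrs n).filter (fun m => decide (m ∉ g)))
              (v ++ [n]) rest
            rw [hseq'] at happ
            have h1 := congrArg Prod.fst happ
            have h2 := congrArg Prod.snd happ
            simp only at h1 h2
            rw [pvFaceSum_cons, ← pvCount_eq g n, Prod.ext_iff]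
            constructor
            · simp only []
              omega
            · simpa using h2.symm
          · intro new s
            rw [List.cons_append, pvRef_step g lo hi v new n (rest ++ s) hb hv, hadd]
            rw [altAir_eq, ← List.append_assoc]
            rw [href' (new ++ [n]) s]
            simp
      · obtain ⟨Δ, hseq, href⟩ := ih hrest
        refine ⟨Δ, ?_, ?_⟩
        · rw [pvSeq_cons_out g lo hi v n rest hn, pvA_skip g lo hi v n (Or.inl hb), hseq]
          simp
        · intro new s
          rw [List.cons_append, pvRef_skip g lo hi v new n (rest ++ s) (Or.inl hb)]
          exact href new s

-- ===== VERDICT (by name: the statement is the Claim_ definition above) =====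
theorem flow_and_count_spec : Claim_equal_flow_and_count := by
  intro g visited p lo hi _hdom hpre
  unfold Spec_flow_and_count flow_and_count flow_and_count_alt
  obtain ⟨Δ, hseq, href⟩ := pvMain g lo hi (pvMu lo hi visited) visited [p] (Nat.le_refl _)
    (by intro n hn; simp at hn; subst hn; exact hpre)
  -- A's value is the face total of Δ
  rw [pvSeq_cons_out g lo hi visited p [] hpre, pvSeq_nil] at hseq
  have hA := congrArg Prod.fst hseq
  simp only at hA
  -- B's value: the fueled loop is the reference loop, which marks exactly Δ
  have hfuel : 7 * pvMu lo hi visited + ([p] : List (Int × Int × Int)).length ≤ altFuel lo hi := by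
    have := pvFuel_enough lo hi visited
    simp [List.length_cons]
    omega
  rw [pvFill_eq_ref g lo hi (altFuel lo hi) visited [] [p] hfuel]
  have h2 := href [] []
  simp only [List.append_nil, List.nil_append] at h2
  rw [h2, pvRef_nil]
  show (pvFlowA g lo hi visited p).val.1 = pvFaceSum g Δ
  omega
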